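-- pv_equiv track=rewrite | github.com/root-project/root | documentation/doxygen/converttonotebook.py | pythonComments
-- ===== SOURCE A (Python) =====
-- def pythonComments(text):
--     """
--     Converts comments delimited by # or ## and on a new line into a markdown cell.
--     For python files only
--     >>> pythonComments('''## This is a
--     ... ## multiline comment
--     ... def function()''')
--     '# <markdowncell>\\n## This is a\\n## multiline comment\\n# <codecell>\\ndef function()\\n'
--     >>> pythonComments('''def function():
--     ...     variable = 5 # Comment not in cell
--     ...     # Comment also not in cell''')
--     'def function():\\n    variable = 5 # Comment not in cell\\n    # Comment also not in cell\\n'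
--     """
--     text = text.splitlines()
--     newtext = ''
--     inComment = False
--     for i, line in enumerate(text):
--         if line.startswith("#") and not inComment:  # True if first line of comment
--             inComment = True
--             newtext += "# <markdowncell>\n"
--             newtext += (line + "\n")
--         elif inComment and not line.startswith("#"):  # True if first line after comment
--             inComment = False
--             newtext += "# <codecell>\n"
--             newtext += (line+"\n")
--         else:
--             newtext += (line+"\n")
--     return newtext
-- ===== SOURCE B (Python) =====
-- def pythonComments(text):
--     lines = text.splitlines()
--     parts = []
--     prev_comment = False
--     i = 0
--     n = len(lines)
--     while i < n:
--         c = lines[i].startswith('#')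
--         j = i + 1
--         while j < n and lines[j].startswith('#') == c:
--             j += 1
--         if c:
--             parts.append('# <markdowncell>\n')
--         elif prev_comment:
--             parts.append('# <codecell>\n')
--         for line in lines[i:j]:
--             parts.append(line + '\n')
--         prev_comment = c
--         i = j
--     return ''.join(parts)
-- ===== Notes on version B (the rewrite author's own statement) =====
-- stated objective: alternative
-- what changed: B replaces A's per-line boolean-state loop with a run-based scan: it finds each maximal run of comment/non-comment lines with an inner advance, emits the marker once per run (markdowncell for comment runs, codecell only after a comment run), then appends the run's lines.
import Mathlib
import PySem

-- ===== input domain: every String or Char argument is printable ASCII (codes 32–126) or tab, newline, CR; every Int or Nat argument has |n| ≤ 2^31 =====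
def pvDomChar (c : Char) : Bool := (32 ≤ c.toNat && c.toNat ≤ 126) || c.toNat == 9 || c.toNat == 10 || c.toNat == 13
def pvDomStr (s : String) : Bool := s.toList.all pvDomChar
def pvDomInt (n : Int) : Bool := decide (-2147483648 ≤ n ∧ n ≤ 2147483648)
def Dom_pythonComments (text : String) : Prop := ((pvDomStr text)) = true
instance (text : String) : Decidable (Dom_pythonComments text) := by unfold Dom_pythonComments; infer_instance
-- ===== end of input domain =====

-- B groups the lines into maximal runs of comment / non-comment lines and emits one marker per
-- run, instead of A's per-line loop threading an inComment boolean; same cost, different shape.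

-- ===== PORT A =====
-- A: for-loop over text.splitlines() with state (inComment, newtext); ported as a foldl.
def pcStep (st : Bool × List Char) (line : List Char) : Bool × List Char :=
  if PySem.Chars.startswith line ['#'] && !st.1 then
    (true, st.2 ++ "# <markdowncell>\n".toList ++ line ++ ['\n'])
  else if st.1 && !PySem.Chars.startswith line ['#'] then
    (false, st.2 ++ "# <codecell>\n".toList ++ line ++ ['\n'])
  else (st.1, st.2 ++ line ++ ['\n'])

def pythonComments (text : String) : String :=
  String.ofList ((PySem.Chars.splitlines text.toList).foldl pcStep (false, [])).2

-- ===== PORT B =====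
-- B's outer while-loop: take the maximal run starting at the current line (the inner j-loop is
-- takeWhile/dropWhile), emit the run's marker, then its lines, then continue with prev = c.
def pcGo : List (List Char) → Bool → List Char
  | [], _ => []
  | l :: ls, prev =>
    (if PySem.Chars.startswith l ['#'] then "# <markdowncell>\n".toList
     else if prev then "# <codecell>\n".toList else [])
      ++ ((l :: ls.takeWhile
            (fun x => PySem.Chars.startswith x ['#'] == PySem.Chars.startswith l ['#'])).flatMap
            (fun x => x ++ ['\n']))
      ++ pcGo (ls.dropWhile (fun x => PySem.Chars.startswith x ['#'] == PySem.Chars.startswith l ['#']))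
          (PySem.Chars.startswith l ['#'])
termination_by lines _ => lines.length
decreasing_by
  simp only [List.length_cons]
  exact Nat.lt_succ_of_le (List.length_dropWhile_le _ _)

def pythonComments_alt (text : String) : String :=
  String.ofList (pcGo (PySem.Chars.splitlines text.toList) false)

-- ===== PRECONDITION & SPEC =====
def Spec_pythonComments (text : String) (out : String) : Prop := out = pythonComments_alt text
instance (text : String) (out : String) : Decidable (Spec_pythonComments text out) := by unfold Spec_pythonComments; infer_instance

-- ===== CLAIM (what is proved, stated in full; the proofs are below) =====
def Claim_equal_pythonComments : Prop := ∀ (text : String), Dom_pythonComments text → Spec_pythonComments text (pythonComments text)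

-- ===== LEMMAS AND PROOFS =====

-- A's loop as a structural recursion (the text produced from state inC onwards).
def pcALoop : List (List Char) → Bool → List Char
  | [], _ => []
  | l :: ls, inC =>
    if PySem.Chars.startswith l ['#'] && !inC then
      "# <markdowncell>\n".toList ++ l ++ ['\n'] ++ pcALoop ls true
    else if inC && !PySem.Chars.startswith l ['#'] then
      "# <codecell>\n".toList ++ l ++ ['\n'] ++ pcALoop ls false
    else
      l ++ ['\n'] ++ pcALoop ls inC

theorem pcFoldl_eq_aLoop (lines : List (List Char)) (inC : Bool) (acc : List Char) :
    (lines.foldl pcStep (inC, acc)).2 = acc ++ pcALoop lines inC := by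
  induction lines generalizing inC acc with
  | nil => simp [pcALoop]
  | cons l ls ih =>
    have ih2 : ∀ st : Bool × List Char, (List.foldl pcStep st ls).2 = st.2 ++ pcALoop ls st.1 :=
      fun st => ih st.1 st.2
    rw [List.foldl_cons, ih2, pcALoop]
    by_cases hl : PySem.Chars.startswith l ['#'] = true <;> cases inC <;>
      simp [pcStep, hl, List.append_assoc]

-- Lines inside a run (same startswith value as the state) are emitted plainly, state unchanged.
theorem pcALoop_run (run rest : List (List Char)) (c : Bool)
    (h : ∀ x ∈ run, PySem.Chars.startswith x ['#'] = c) :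
    pcALoop (run ++ rest) c = run.flatMap (fun x => x ++ ['\n']) ++ pcALoop rest c := by
  induction run with
  | nil => simp
  | cons l ls ih =>
    have hl : PySem.Chars.startswith l ['#'] = c := h l List.mem_cons_self
    have ih' := ih (fun x hx => h x (List.mem_cons_of_mem _ hx))
    cases c <;> simp [pcALoop, hl, ih', List.append_assoc]

-- In every reachable state, prev = true forces the next line not to start with '#'.
theorem pcALoop_eq_pcGo (lines : List (List Char)) (prev : Bool)
    (h : prev = true → ∀ l ls, lines = l :: ls → PySem.Chars.startswith l ['#'] = false) :
    pcALoop lines prev = pcGo lines prev := by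
  induction lines, prev using pcGo.induct with
  | case1 prev => simp [pcALoop, pcGo]
  | case2 l ls prev ih =>
    have hrun : ∀ x ∈ ls.takeWhile
        (fun x => PySem.Chars.startswith x ['#'] == PySem.Chars.startswith l ['#']),
        PySem.Chars.startswith x ['#'] = PySem.Chars.startswith l ['#'] := by
      intro x hx
      simpa using List.mem_takeWhile_imp (l := ls) hx
    have hsplit :
        ls.takeWhile (fun x => PySem.Chars.startswith x ['#'] == PySem.Chars.startswith l ['#'])
          ++ ls.dropWhile (fun x => PySem.Chars.startswith x ['#'] == PySem.Chars.startswith l ['#'])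
          = ls := List.takeWhile_append_dropWhile
    have ih' : pcALoop
        (ls.dropWhile (fun x => PySem.Chars.startswith x ['#'] == PySem.Chars.startswith l ['#']))
        (PySem.Chars.startswith l ['#']) = pcGo
        (ls.dropWhile (fun x => PySem.Chars.startswith x ['#'] == PySem.Chars.startswith l ['#']))
        (PySem.Chars.startswith l ['#']) := by
      apply ih
      intro hc r rs hr
      have hhd := List.head?_dropWhile_not
        (fun x => PySem.Chars.startswith x ['#'] == PySem.Chars.startswith l ['#']) ls
      rw [hr] at hhd
      simp only [List.head?_cons] at hhd
      rw [hc] at hhd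
      simpa using hhd
    have key := pcALoop_run
      (ls.takeWhile (fun x => PySem.Chars.startswith x ['#'] == PySem.Chars.startswith l ['#']))
      (ls.dropWhile (fun x => PySem.Chars.startswith x ['#'] == PySem.Chars.startswith l ['#']))
      (PySem.Chars.startswith l ['#']) hrun
    rw [hsplit] at key
    rw [pcGo, pcALoop]
    rcases Bool.eq_false_or_eq_true prev with hprev | hprev <;> subst hprev
    · -- prev = true: the reachability hypothesis gives a non-'#' line
      have hl : PySem.Chars.startswith l ['#'] = false := h rfl l ls rfl
      rw [hl] at key ih'
      simp [hl, key, List.append_assoc]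
      try simpa using ih'
    · -- prev = false: no codecell marker possible; branch on the line's kind
      cases hl : PySem.Chars.startswith l ['#'] <;>
        · rw [hl] at key ih'
          simp [hl, key, List.append_assoc]
          try simpa using ih'

-- ===== VERDICT (by name: the statement is the Claim_ definition above) =====
theorem pythonComments_spec : Claim_equal_pythonComments := by
  intro text _
  unfold Spec_pythonComments pythonComments pythonComments_alt
  rw [pcFoldl_eq_aLoop, pcALoop_eq_pcGo _ _ (by simp)]
  simp
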